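-- pv_equiv track=rewrite | github.com/acertainromance401/SentiVision | test/test_model_comparison.py | build_grouped_label_menu
-- ===== SOURCE A (Python) =====
-- LABEL_GROUPS = {
--     '활력/행동': [
--         'ALERTNESS', 'COURAGE', 'DYNAMIC', 'ENERGY', 'EXCITEMENT', 'HAPPINESS',
--         'INTENSITY', 'LIVELY', 'OPTIMISM', 'PASSION', 'STRENGTH', 'URGENCY',
--         'WARMTH',
--     ],
--     '안정/회복': [
--         'BALANCE', 'CALMNESS', 'COMFORT', 'CONNECTION', 'DURABILITY', 'FREEDOM',
--         'FRESHNESS', 'GROWTH', 'HARMONY', 'HEALING', 'HOPE', 'HONESTY',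
--         'PEACE', 'RENEWAL', 'SECURITY', 'STABILITY', 'STILLNESS', 'TRANQUILITY',
--         'TRUST',
--     ],
--     '관계/애정': [
--         'COOPERATION', 'FEMININE', 'FRIENDSHIP', 'LOVE', 'ROMANCE',
--     ],
--     '권위/가치': [
--         'ABUNDANCE', 'AUTHORITY', 'CONFIDENCE', 'DEPTH', 'ELEGANCE', 'IDEALISTIC',
--         'PRACTICAL', 'REALITY', 'ROYALTY', 'SOPHISTICATION', 'WEALTH',
--     ],
--     '창의/의미': [
--         'BEAUTY', 'CREATIVITY', 'IDEALISTIC', 'MYSTERY', 'SPIRITUAL',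
--     ],
--     '자연/중립': [
--         'GROUNDED', 'IMMATURITY', 'MILITARY', 'NATURE', 'RESERVED',
--     ],
--     '긴장/위협': [
--         'ANXIETY', 'CAUTION', 'CHAOS', 'COWARDICE', 'EGOTISM', 'FEAR', 'PROTEST',
--         'SIN', 'TENSION', 'VULGARITY',
--     ],
--     '어둠/상실': [
--         'ALIENATION', 'COLDNESS', 'DARKNESS', 'DEATH', 'DEPRESSION', 'DESPAIR',
--         'DULLNESS', 'FATIGUE', 'ISOLATION', 'LONELINESS', 'LOSS', 'SAD',
--     ],
-- }
--
-- def build_grouped_label_menu(labels):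
--     """감정 라벨을 감정군별로 묶고 선택 순서를 만든다."""
--     unique_labels = []
--     seen = set()
--     for label in labels:
--         if label not in seen:
--             unique_labels.append(label)
--             seen.add(label)
--
--     grouped = []
--     assigned = set()
--     for group_name, group_labels in LABEL_GROUPS.items():
--         current_labels = [label for label in group_labels if label in seen and label not in assigned]
--         if current_labels:
--             grouped.append((group_name, current_labels))
--             assigned.update(current_labels)
--
--     remaining = sorted([label for label in unique_labels if label not in assigned])
--     if remaining:
--         grouped.append(('기타', remaining))
--
--     ordered_labels = []
--     for _, group_labels in grouped:
--         ordered_labels.extend(group_labels)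
--
--     return ordered_labels, grouped
-- ===== SOURCE B (Python) =====
-- # B: precompute a first-occurrence rank/group index over LABEL_GROUPS once, then
-- # sort the present known labels by rank and group consecutive runs — no per-group scans.
-- LABEL_GROUPS = {
--     '활력/행동': [
--         'ALERTNESS', 'COURAGE', 'DYNAMIC', 'ENERGY', 'EXCITEMENT', 'HAPPINESS',
--         'INTENSITY', 'LIVELY', 'OPTIMISM', 'PASSION', 'STRENGTH', 'URGENCY',
--         'WARMTH',
--     ],
--     '안정/회복': [
--         'BALANCE', 'CALMNESS', 'COMFORT', 'CONNECTION', 'DURABILITY', 'FREEDOM',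
--         'FRESHNESS', 'GROWTH', 'HARMONY', 'HEALING', 'HOPE', 'HONESTY',
--         'PEACE', 'RENEWAL', 'SECURITY', 'STABILITY', 'STILLNESS', 'TRANQUILITY',
--         'TRUST',
--     ],
--     '관계/애정': [
--         'COOPERATION', 'FEMININE', 'FRIENDSHIP', 'LOVE', 'ROMANCE',
--     ],
--     '권위/가치': [
--         'ABUNDANCE', 'AUTHORITY', 'CONFIDENCE', 'DEPTH', 'ELEGANCE', 'IDEALISTIC',
--         'PRACTICAL', 'REALITY', 'ROYALTY', 'SOPHISTICATION', 'WEALTH',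
--     ],
--     '창의/의미': [
--         'BEAUTY', 'CREATIVITY', 'IDEALISTIC', 'MYSTERY', 'SPIRITUAL',
--     ],
--     '자연/중립': [
--         'GROUNDED', 'IMMATURITY', 'MILITARY', 'NATURE', 'RESERVED',
--     ],
--     '긴장/위협': [
--         'ANXIETY', 'CAUTION', 'CHAOS', 'COWARDICE', 'EGOTISM', 'FEAR', 'PROTEST',
--         'SIN', 'TENSION', 'VULGARITY',
--     ],
--     '어둠/상실': [
--         'ALIENATION', 'COLDNESS', 'DARKNESS', 'DEATH', 'DEPRESSION', 'DESPAIR',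
--         'DULLNESS', 'FATIGUE', 'ISOLATION', 'LONELINESS', 'LOSS', 'SAD',
--     ],
-- }
--
-- # rank/group-name index, first occurrence wins (IDEALISTIC maps to its earliest group)
-- _RANK = {}
-- _GROUP_OF = {}
-- _r = 0
-- for _name, _labs in LABEL_GROUPS.items():
--     for _lab in _labs:
--         if _lab not in _RANK:
--             _RANK[_lab] = _r
--             _GROUP_OF[_lab] = _name
--         _r += 1
--
--
-- def build_grouped_label_menu(labels):
--     """감정 라벨을 감정군별로 묶고 선택 순서를 만든다."""
--     present = set(labels)
--     known = sorted((l for l in present if l in _RANK), key=lambda l: _RANK[l])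
--     grouped = []
--     for lab in known:
--         name = _GROUP_OF[lab]
--         if grouped and grouped[-1][0] == name:
--             grouped[-1][1].append(lab)
--         else:
--             grouped.append((name, [lab]))
--     others = sorted(l for l in present if l not in _RANK)
--     if others:
--         grouped.append(('기타', others))
--     ordered_labels = [l for _, g in grouped for l in g]
--     return ordered_labels, grouped
-- ===== Notes on version B (the rewrite author's own statement) =====
-- stated objective: alternative
-- what changed: A scans every group list per call, filtering each against the seen/assigned sets; B precomputes a first-occurrence rank and group-name index over LABEL_GROUPS once at module load, then sorts the present known labels by rank and groups consecutive runs, handling duplicate labels (IDEALISTIC) by first-occurrence ranking instead of an assigned set.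
import Mathlib
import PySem

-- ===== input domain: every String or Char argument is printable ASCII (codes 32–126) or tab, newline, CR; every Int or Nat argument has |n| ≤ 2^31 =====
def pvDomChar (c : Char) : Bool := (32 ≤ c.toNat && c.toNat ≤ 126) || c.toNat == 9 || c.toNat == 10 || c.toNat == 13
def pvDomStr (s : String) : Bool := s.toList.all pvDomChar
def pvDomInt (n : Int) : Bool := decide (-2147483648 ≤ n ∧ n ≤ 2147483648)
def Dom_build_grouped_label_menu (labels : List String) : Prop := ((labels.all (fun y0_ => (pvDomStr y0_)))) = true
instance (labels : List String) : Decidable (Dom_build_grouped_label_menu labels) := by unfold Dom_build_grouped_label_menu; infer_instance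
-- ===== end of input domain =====

-- B replaces A's per-group membership scans by a precomputed first-occurrence rank index:
-- sort the present known labels once by rank and group consecutive runs (objective: alternative).

-- LABEL_GROUPS, as an insertion-ordered association list
def pvGroups : List (String × List String) := [
  ("활력/행동", ["ALERTNESS", "COURAGE", "DYNAMIC", "ENERGY", "EXCITEMENT", "HAPPINESS", "INTENSITY", "LIVELY", "OPTIMISM", "PASSION", "STRENGTH", "URGENCY", "WARMTH"]),
  ("안정/회복", ["BALANCE", "CALMNESS", "COMFORT", "CONNECTION", "DURABILITY", "FREEDOM", "FRESHNESS", "GROWTH", "HARMONY", "HEALING", "HOPE", "HONESTY", "PEACE", "RENEWAL", "SECURITY", "STABILITY", "STILLNESS", "TRANQUILITY", "TRUST"]),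
  ("관계/애정", ["COOPERATION", "FEMININE", "FRIENDSHIP", "LOVE", "ROMANCE"]),
  ("권위/가치", ["ABUNDANCE", "AUTHORITY", "CONFIDENCE", "DEPTH", "ELEGANCE", "IDEALISTIC", "PRACTICAL", "REALITY", "ROYALTY", "SOPHISTICATION", "WEALTH"]),
  ("창의/의미", ["BEAUTY", "CREATIVITY", "IDEALISTIC", "MYSTERY", "SPIRITUAL"]),
  ("자연/중립", ["GROUNDED", "IMMATURITY", "MILITARY", "NATURE", "RESERVED"]),
  ("긴장/위협", ["ANXIETY", "CAUTION", "CHAOS", "COWARDICE", "EGOTISM", "FEAR", "PROTEST", "SIN", "TENSION", "VULGARITY"]),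
  ("어둠/상실", ["ALIENATION", "COLDNESS", "DARKNESS", "DEATH", "DEPRESSION", "DESPAIR", "DULLNESS", "FATIGUE", "ISOLATION", "LONELINESS", "LOSS", "SAD"])
]

-- ===== PORT A =====
def build_grouped_label_menu (labels : List String) : List String × (List (String × List String)) :=
  -- unique_labels / seen loop
  let us := labels.foldl (fun (p : List String × PySem.Set String) label =>
      if PySem.Set.contains p.2 label then p
      else (p.1 ++ [label], PySem.Set.add p.2 label)) ([], PySem.Set.empty)
  let unique_labels := us.1
  let seen := us.2
  -- grouped / assigned loop over LABEL_GROUPS.items()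
  let ga := pvGroups.foldl (fun (p : List (String × List String) × PySem.Set String) g =>
      let current := g.2.filter (fun l => PySem.Set.contains seen l && !(PySem.Set.contains p.2 l))
      if current.isEmpty then p
      else (p.1 ++ [(g.1, current)], PySem.Set.update p.2 current)) ([], PySem.Set.empty)
  let grouped := ga.1
  let assigned := ga.2
  let remaining := PySem.List.sorted (unique_labels.filter (fun l => !(PySem.Set.contains assigned l))) (fun x => x) false
  let grouped := if remaining.isEmpty then grouped else grouped ++ [("기타", remaining)]
  let ordered := grouped.foldl (fun (acc : List String) g => acc ++ g.2) []
  (ordered, grouped)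

-- ===== PORT B =====
-- module-level index build: _RANK (first-occurrence rank) and _GROUP_OF (first group name)
def pvIndex : PySem.Dict String Int × PySem.Dict String String :=
  let st := pvGroups.foldl (fun (st : PySem.Dict String Int × PySem.Dict String String × Int) g =>
      g.2.foldl (fun (st2 : PySem.Dict String Int × PySem.Dict String String × Int) lab =>
          if (st2.1).contains lab then (st2.1, st2.2.1, st2.2.2 + 1)
          else ((st2.1).insert lab st2.2.2, (st2.2.1).insert lab g.1, st2.2.2 + 1)) st)
    (PySem.Dict.empty, PySem.Dict.empty, 0)
  (st.1, st.2.1)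

-- B's grouping step (Python's append/modify-last grouping step; the accumulator is kept in reverse, head = grouped[-1])
def pvGstep (acc : List (String × List String)) (lab : String) : List (String × List String) :=
  let name := pvIndex.2.getD lab ""
  match acc with
  | (n, ls) :: rest => if n == name then (n, ls ++ [lab]) :: rest else (name, [lab]) :: (n, ls) :: rest
  | [] => [(name, [lab])]

def build_grouped_label_menu_alt (labels : List String) : List String × (List (String × List String)) :=
  let rank := pvIndex.1
  let present : PySem.Set String := PySem.Set.ofList labels
  -- sorted((l for l in present if l in _RANK), key=lambda l: _RANK[l]); KeyError impossible on the filtered list, so getD is exact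
  let known := PySem.List.sorted (present.filter (fun l => rank.contains l)) (fun l => rank.getD l 0) false
  let rev := known.foldl pvGstep []
  let grouped := rev.reverse
  let others := PySem.List.sorted (present.filter (fun l => !(rank.contains l))) (fun x => x) false
  let grouped := if others.isEmpty then grouped else grouped ++ [("기타", others)]
  (grouped.flatMap (fun g => g.2), grouped)

-- ===== PRECONDITION & SPEC =====
def Spec_build_grouped_label_menu (labels : List String) (out : List String × (List (String × List String))) : Prop := out = build_grouped_label_menu_alt labels
instance (labels : List String) (out : List String × (List (String × List String))) : Decidable (Spec_build_grouped_label_menu labels out) := by unfold Spec_build_grouped_label_menu; infer_instance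

-- ===== CLAIM (what is proved, stated in full; the proofs are below) =====
def Claim_equal_build_grouped_label_menu : Prop := ∀ (labels : List String), Dom_build_grouped_label_menu labels → Spec_build_grouped_label_menu labels (build_grouped_label_menu labels)

-- ===== LEMMAS AND PROOFS =====

-- canonical form of A's grouped-loop: per group, the labels present in S and not covered by P (labels of earlier groups)
def pvCanon (gs : List (String × List String)) (S P : List String) : List (String × List String) :=
  match gs with
  | [] => []
  | g :: gs =>
    let cur := g.2.filter (fun l => PySem.Set.contains S l && !(PySem.Set.contains P l))
    if cur.isEmpty then pvCanon gs S (P ++ g.2) else (g.1, cur) :: pvCanon gs S (P ++ g.2)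

-- the flat first-occurrence label sequence (closed literal when P = [])
def pvFlat (gs : List (String × List String)) (P : List String) : List String :=
  match gs with
  | [] => []
  | g :: gs => g.2.filter (fun l => !(PySem.Set.contains P l)) ++ pvFlat gs (P ++ g.2)

-- closed per-group check: every label not shadowed by earlier groups maps to its group's name in _GROUP_OF
def pvGOK : List (String × List String) → List String → Bool
  | [], _ => true
  | g :: gs, P =>
    (g.2.all (fun l => PySem.Set.contains P l || (pvIndex.2.getD l "" == g.1))) && pvGOK gs (P ++ g.2)

theorem pvBoolExt (a b : Bool) (h : a = true ↔ b = true) : a = b := Bool.coe_iff_coe.mp h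

theorem pvContains_append (P Q : List String) (l : String) :
    PySem.Set.contains (P ++ Q) l = (PySem.Set.contains P l || PySem.Set.contains Q l) := by
  refine pvBoolExt _ _ ?_
  simp [List.mem_append]

theorem pvContains_update (s : PySem.Set String) (xs : List String) (l : String) :
    PySem.Set.contains (PySem.Set.update s xs) l
      = (PySem.Set.contains s l || PySem.Set.contains xs l) := by
  refine pvBoolExt _ _ ?_
  simp [PySem.Set.mem_update]

theorem pvContains_filter (p : String → Bool) (xs : List String) (l : String) :
    PySem.Set.contains (xs.filter p) l = (PySem.Set.contains xs l && p l) := by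
  refine pvBoolExt _ _ ?_
  simp [List.mem_filter]

theorem pvContains_nil (l : String) : PySem.Set.contains ([] : List String) l = false := by
  refine pvBoolExt _ _ ?_
  simp

theorem pvCanon_cons (g : String × List String) (gs : List (String × List String)) (S P : List String) :
    pvCanon (g :: gs) S P =
      (if (g.2.filter (fun l => PySem.Set.contains S l && !(PySem.Set.contains P l))).isEmpty
       then pvCanon gs S (P ++ g.2)
       else (g.1, g.2.filter (fun l => PySem.Set.contains S l && !(PySem.Set.contains P l)))
          :: pvCanon gs S (P ++ g.2)) := rfl

theorem pvFlat_cons (g : String × List String) (gs : List (String × List String)) (P : List String) :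
    pvFlat (g :: gs) P
      = g.2.filter (fun l => !(PySem.Set.contains P l)) ++ pvFlat gs (P ++ g.2) := rfl

-- A's unique/seen loop computes (dedup, dedup)
theorem pvA1 (xs : List String) (s : List String) :
    xs.foldl (fun (p : List String × PySem.Set String) label =>
      if PySem.Set.contains p.2 label then p
      else (p.1 ++ [label], PySem.Set.add p.2 label)) (s, s)
    = (PySem.Set.update s xs, PySem.Set.update s xs) := by
  induction xs generalizing s with
  | nil => rfl
  | cons x xs ih =>
    simp only [List.foldl_cons]
    cases h : PySem.Set.contains s x with
    | true =>
      have hm : x ∈ s := (PySem.Set.contains_iff s x).mp h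
      have hadd : PySem.Set.add s x = s := by simp [PySem.Set.add, hm]
      simp only [if_true]
      rw [show PySem.Set.update s (x :: xs) = PySem.Set.update (PySem.Set.add s x) xs from rfl, hadd]
      exact ih s
    | false =>
      have hm : x ∉ s := by
        intro hx
        rw [(PySem.Set.contains_iff s x).mpr hx] at h
        exact absurd h (by simp)
      have hadd : PySem.Set.add s x = s ++ [x] := by simp [PySem.Set.add, hm]
      simp only [if_false, Bool.false_eq_true, hadd]
      rw [show PySem.Set.update s (x :: xs) = PySem.Set.update (PySem.Set.add s x) xs from rfl, hadd]
      exact ih (s ++ [x])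

-- A's grouped loop = pvCanon, and the final assigned set's membership
theorem pvA2 (gs : List (String × List String)) (S : List String) :
    ∀ (P : List String) (acc : List (String × List String)) (assigned : PySem.Set String),
    (∀ l, PySem.Set.contains assigned l = (PySem.Set.contains S l && PySem.Set.contains P l)) →
    (gs.foldl (fun (p : List (String × List String) × PySem.Set String) g =>
      let current := g.2.filter (fun l => PySem.Set.contains S l && !(PySem.Set.contains p.2 l))
      if current.isEmpty then p
      else (p.1 ++ [(g.1, current)], PySem.Set.update p.2 current)) (acc, assigned)).1
      = acc ++ pvCanon gs S P
    ∧ (∀ l, PySem.Set.contains (gs.foldl (fun (p : List (String × List String) × PySem.Set String) g =>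
      let current := g.2.filter (fun l => PySem.Set.contains S l && !(PySem.Set.contains p.2 l))
      if current.isEmpty then p
      else (p.1 ++ [(g.1, current)], PySem.Set.update p.2 current)) (acc, assigned)).2 l
        = (PySem.Set.contains S l && PySem.Set.contains (P ++ gs.flatMap (fun g => g.2)) l)) := by
  induction gs with
  | nil =>
    intro P acc assigned hinv
    refine ⟨by simp [pvCanon], fun l => by simpa using hinv l⟩
  | cons g gs ih =>
    intro P acc assigned hinv
    simp only [List.foldl_cons]
    have hcur : g.2.filter (fun l => PySem.Set.contains S l && !(PySem.Set.contains assigned l))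
        = g.2.filter (fun l => PySem.Set.contains S l && !(PySem.Set.contains P l)) := by
      refine List.filter_congr (fun l _ => ?_)
      rw [hinv l]
      cases PySem.Set.contains S l <;> cases PySem.Set.contains P l <;> rfl
    rw [hcur]
    cases hemp : (g.2.filter (fun l => PySem.Set.contains S l && !(PySem.Set.contains P l))).isEmpty with
    | true =>
      have hnil : g.2.filter (fun l => PySem.Set.contains S l && !(PySem.Set.contains P l)) = [] :=
        List.isEmpty_iff.mp hemp
      have hg2 : ∀ a, PySem.Set.contains g.2 a = true → PySem.Set.contains S a = true →
          PySem.Set.contains P a = true := by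
        intro a hG hS
        have hb := List.filter_eq_nil_iff.mp hnil a ((PySem.Set.contains_iff _ _).mp hG)
        cases hP : PySem.Set.contains P a
        · rw [hS, hP] at hb; simp at hb
        · rfl
      have hinv' : ∀ l, PySem.Set.contains assigned l
          = (PySem.Set.contains S l && PySem.Set.contains (P ++ g.2) l) := by
        intro l
        rw [hinv l, pvContains_append]
        have := hg2 l
        cases hS : PySem.Set.contains S l <;> cases hP : PySem.Set.contains P l <;>
          cases hG : PySem.Set.contains g.2 l <;> simp_all
      have := ih (P ++ g.2) acc assigned hinv'
      simp only [if_true]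
      refine ⟨?_, fun l => ?_⟩
      · rw [this.1, pvCanon_cons, hemp]
        simp
      · rw [this.2 l]
        simp [List.append_assoc]
    | false =>
      have hinv' : ∀ l, PySem.Set.contains (PySem.Set.update assigned
            (g.2.filter (fun l => PySem.Set.contains S l && !(PySem.Set.contains P l)))) l
          = (PySem.Set.contains S l && PySem.Set.contains (P ++ g.2) l) := by
        intro l
        rw [pvContains_update, pvContains_filter, hinv l, pvContains_append]
        cases PySem.Set.contains S l <;> cases PySem.Set.contains P l <;>
          cases PySem.Set.contains g.2 l <;> rfl
      have := ih (P ++ g.2)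
        (acc ++ [(g.1, g.2.filter (fun l => PySem.Set.contains S l && !(PySem.Set.contains P l)))])
        (PySem.Set.update assigned
          (g.2.filter (fun l => PySem.Set.contains S l && !(PySem.Set.contains P l)))) hinv'
      simp only [if_false, Bool.false_eq_true]
      refine ⟨?_, fun l => ?_⟩
      · rw [this.1, pvCanon_cons, hemp]
        simp [List.append_assoc]
      · rw [this.2 l]
        simp [List.append_assoc]

theorem pvCanon_names_sublist (gs : List (String × List String)) (S : List String) :
    ∀ P, ((pvCanon gs S P).map Prod.fst).Sublist (gs.map Prod.fst) := by
  induction gs with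
  | nil => intro P; simp [pvCanon]
  | cons g gs ih =>
    intro P
    rw [pvCanon_cons]
    split
    · exact (ih (P ++ g.2)).trans (List.sublist_cons_self _ _)
    · simp only [List.map_cons]
      exact List.Sublist.cons₂ g.1 (ih (P ++ g.2))

theorem pvCanon_nonempty (gs : List (String × List String)) (S : List String) :
    ∀ P, ∀ c ∈ pvCanon gs S P, c.2 ≠ [] := by
  induction gs with
  | nil => intro P c hc; simp [pvCanon] at hc
  | cons g gs ih =>
    intro P c hc
    rw [pvCanon_cons] at hc
    split at hc
    · exact ih _ c hc
    · rename_i h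
      rcases List.mem_cons.mp hc with rfl | hc
      · intro hnil
        exact h (List.isEmpty_iff.mpr hnil)
      · exact ih _ c hc

theorem pvCanon_gof (gs : List (String × List String)) (S : List String) :
    ∀ P, pvGOK gs P = true → ∀ c ∈ pvCanon gs S P, ∀ l ∈ c.2, pvIndex.2.getD l "" = c.1 := by
  induction gs with
  | nil => intro P _ c hc; simp [pvCanon] at hc
  | cons g gs ih =>
    intro P hok c hc l hl
    simp only [pvGOK, Bool.and_eq_true, List.all_eq_true] at hok
    rw [pvCanon_cons] at hc
    split at hc
    · exact ih _ hok.2 c hc l hl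
    · rcases List.mem_cons.mp hc with rfl | hc
      · simp only [List.mem_filter, Bool.and_eq_true, Bool.not_eq_eq_eq_not, Bool.not_true] at hl
        have := hok.1 l hl.1
        rcases Bool.or_eq_true_iff.mp this with hP | hname
        · rw [hl.2.2] at hP
          exact absurd hP (by simp)
        · exact eq_of_beq hname
      · exact ih _ hok.2 c hc l hl

theorem pvCanon_flat_sublist (gs : List (String × List String)) (S : List String) :
    ∀ P, ((pvCanon gs S P).flatMap (fun c => c.2)).Sublist (pvFlat gs P) := by
  induction gs with
  | nil => intro P; simp [pvCanon, pvFlat]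
  | cons g gs ih =>
    intro P
    rw [pvCanon_cons, pvFlat_cons]
    have hsub : (g.2.filter (fun l => PySem.Set.contains S l && !(PySem.Set.contains P l))).Sublist
        (g.2.filter (fun l => !(PySem.Set.contains P l))) := by
      have h0 := List.filter_sublist (p := fun l => PySem.Set.contains S l)
        (l := g.2.filter (fun l => !(PySem.Set.contains P l)))
      rw [List.filter_filter] at h0
      exact h0
    split
    · exact (ih (P ++ g.2)).trans (List.sublist_append_right _ _)
    · simpa using List.Sublist.append hsub (ih (P ++ g.2))

theorem pvCanon_flat_mem (gs : List (String × List String)) (S : List String) :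
    ∀ P l, l ∈ (pvCanon gs S P).flatMap (fun c => c.2)
      ↔ (PySem.Set.contains S l = true ∧ l ∈ pvFlat gs P) := by
  induction gs with
  | nil => intro P l; simp [pvCanon, pvFlat]
  | cons g gs ih =>
    intro P l
    rw [pvCanon_cons, pvFlat_cons]
    split
    · rename_i h
      have hnil : g.2.filter (fun l => PySem.Set.contains S l && !(PySem.Set.contains P l)) = [] :=
        List.isEmpty_iff.mp h
      rw [ih (P ++ g.2) l]
      simp only [List.mem_append, List.mem_filter]
      constructor
      · rintro ⟨hS, hf⟩
        exact ⟨hS, Or.inr hf⟩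
      · rintro ⟨hS, hcase | hf⟩
        · exfalso
          have := List.filter_eq_nil_iff.mp hnil l hcase.1
          rw [hS, hcase.2] at this
          simp at this
        · exact ⟨hS, hf⟩
    · simp only [List.flatMap_cons, List.mem_append, ih (P ++ g.2) l, List.mem_filter,
        Bool.and_eq_true, Bool.not_eq_eq_eq_not, Bool.not_true]
      constructor
      · rintro (⟨hg, hS, hP⟩ | ⟨hS, hf⟩)
        · exact ⟨hS, Or.inl ⟨hg, hP⟩⟩
        · exact ⟨hS, Or.inr hf⟩
      · rintro ⟨hS, ⟨hg, hP⟩ | hf⟩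
        · exact Or.inl ⟨hg, hS, hP⟩
        · exact Or.inr ⟨hS, hf⟩

theorem pvFlat_mem (gs : List (String × List String)) :
    ∀ P l, l ∈ pvFlat gs P ↔ (l ∈ gs.flatMap (fun g => g.2) ∧ ¬ l ∈ P) := by
  induction gs with
  | nil => intro P l; simp [pvFlat]
  | cons g gs ih =>
    intro P l
    rw [pvFlat_cons]
    simp only [List.mem_append, List.mem_filter, ih (P ++ g.2), List.flatMap_cons,
      List.mem_append, Bool.not_eq_eq_eq_not, Bool.not_true]
    constructor
    · rintro (⟨hg, hP⟩ | ⟨hf, hP⟩)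
      · refine ⟨Or.inl hg, fun hp => ?_⟩
        rw [(PySem.Set.contains_iff P l).mpr hp] at hP
        exact absurd hP (by simp)
      · exact ⟨Or.inr hf, fun hp => hP (Or.inl hp)⟩
    · rintro ⟨hg | hf, hP⟩
      · refine Or.inl ⟨hg, ?_⟩
        cases hc : PySem.Set.contains P l
        · rfl
        · exact absurd ((PySem.Set.contains_iff P l).mp hc) hP
      · by_cases hgm : l ∈ g.2
        · refine Or.inl ⟨hgm, ?_⟩
          cases hc : PySem.Set.contains P l
          · rfl
          · exact absurd ((PySem.Set.contains_iff P l).mp hc) hP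
        · refine Or.inr ⟨hf, fun hp => ?_⟩
          rcases hp with h | h
          · exact hP h
          · exact hgm h

theorem pvInner (ls : List String) (n : String) :
    ∀ (part : List String) (rest : List (String × List String)),
    (∀ l ∈ ls, pvIndex.2.getD l "" = n) →
    ls.foldl pvGstep ((n, part) :: rest) = (n, part ++ ls) :: rest := by
  induction ls with
  | nil => intro part rest _; simp
  | cons l ls ih =>
    intro part rest h
    have hn : pvIndex.2.getD l "" = n := h l (by simp)
    simp only [List.foldl_cons]
    rw [show pvGstep ((n, part) :: rest) l = (n, part ++ [l]) :: rest from by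
      simp [pvGstep, hn]]
    rw [ih (part ++ [l]) rest (fun x hx => h x (by simp [hx]))]
    simp

theorem pvOuter (cs : List (String × List String)) :
    ∀ (racc : List (String × List String)),
    (∀ c ∈ cs, c.2 ≠ []) →
    (∀ c ∈ cs, ∀ l ∈ c.2, pvIndex.2.getD l "" = c.1) →
    ((cs.map Prod.fst).Pairwise (· ≠ ·)) →
    (∀ a ∈ racc.head?, ∀ c ∈ cs.head?, a.1 ≠ c.1) →
    (cs.flatMap (fun c => c.2)).foldl pvGstep racc = cs.reverse ++ racc := by
  induction cs with
  | nil => intro racc _ _ _ _; simp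
  | cons c cs ih =>
    intro racc h1 h2 h3 h4
    have hls : c.2 ≠ [] := h1 c (by simp)
    obtain ⟨l, ls', hc2⟩ := List.exists_cons_of_ne_nil hls
    have hn : pvIndex.2.getD l "" = c.1 := h2 c (by simp) l (by rw [hc2]; simp)
    simp only [List.flatMap_cons, List.foldl_append, hc2, List.foldl_cons]
    have hfirst : pvGstep racc l = (c.1, [l]) :: racc := by
      cases racc with
      | nil => simp [pvGstep, hn]
      | cons a rs =>
        have hne : a.1 ≠ c.1 := h4 a (by simp) c (by simp)
        have hbeq : (a.1 == c.1) = false := by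
          cases hb : a.1 == c.1
          · rfl
          · exact absurd (eq_of_beq hb) hne
        obtain ⟨a1, a2⟩ := a
        simp only at hbeq
        simp [pvGstep, hn, hbeq]
    rw [hfirst, pvInner ls' c.1 [l] racc
      (fun x hx => h2 c (by simp) x (by rw [hc2]; simp [hx]))]
    simp only [List.singleton_append]
    rw [List.map_cons] at h3
    have hpair := List.pairwise_cons.mp h3
    rw [ih ((c.1, l :: ls') :: racc) (fun d hd => h1 d (by simp [hd]))
      (fun d hd => h2 d (by simp [hd]) ) hpair.2 ?_]
    · rw [show (c.1, l :: ls') = c from by rw [← hc2]]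
      simp
    · intro a ha d hd
      simp only [List.head?_cons, Option.mem_def, Option.some.injEq] at ha
      subst ha
      cases cs with
      | nil => simp at hd
      | cons e es =>
        simp only [List.head?_cons, Option.mem_def, Option.some.injEq] at hd
        subst hd
        exact hpair.1 _ (by simp)

-- closed facts about the literal index tables, checked by the kernel
set_option maxRecDepth 10000 in
theorem pvKeys : pvIndex.1.keys = pvFlat pvGroups [] := by decide

set_option maxRecDepth 10000 in
theorem pvRanks : ((pvFlat pvGroups []).map (fun l => pvIndex.1.getD l 0)).Pairwise (· < ·) := by
  decide

set_option maxRecDepth 10000 in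
theorem pvFlatNodup : (pvFlat pvGroups []).Nodup := by decide

theorem pvNamesNodup : (pvGroups.map Prod.fst).Nodup := by decide

set_option maxRecDepth 10000 in
theorem pvGOKtrue : pvGOK pvGroups [] = true := by decide

-- ===== VERDICT (by name: the statement is the Claim_ definition above) =====
theorem build_grouped_label_menu_spec : Claim_equal_build_grouped_label_menu := by
  intro labels _
  unfold Spec_build_grouped_label_menu
  unfold build_grouped_label_menu build_grouped_label_menu_alt
  rw [show (PySem.Set.empty : PySem.Set String) = ([] : List String) from rfl]
  rw [pvA1 labels []]
  rw [show PySem.Set.update [] labels = PySem.Set.ofList labels from rfl]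
  have h0 : ∀ l, PySem.Set.contains ([] : List String) l
      = (PySem.Set.contains (PySem.Set.ofList labels) l && PySem.Set.contains ([] : List String) l) := by
    intro l
    rw [pvContains_nil]
    simp
  have hA2 := pvA2 pvGroups (PySem.Set.ofList labels) [] [] [] h0
  dsimp only
  rw [hA2.1, List.nil_append]
  -- membership in the dict index = membership in the flat label sequence
  have hPall : ∀ l, PySem.Set.contains (List.flatMap (fun (g : String × List String) => g.2) pvGroups) l
      = pvIndex.1.contains l := by
    intro l
    refine pvBoolExt _ _ ?_
    rw [PySem.Set.contains_iff, PySem.Dict.contains_iff_mem_keys, pvKeys]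
    have h := pvFlat_mem pvGroups [] l
    simp only [List.not_mem_nil, not_false_iff, and_true] at h
    rw [h]
  -- the unknown-label filters of A and B coincide
  have hfilt : ∀ (b : PySem.Set String),
      (∀ l, b.contains l = ((PySem.Set.ofList labels).contains l
        && PySem.Set.contains ([] ++ List.flatMap (fun (g : String × List String) => g.2) pvGroups) l)) →
      List.filter (fun l => !(b.contains l)) (PySem.Set.ofList labels)
        = List.filter (fun l => !(pvIndex.1.contains l)) (PySem.Set.ofList labels) := by
    intro b hb
    refine List.filter_congr ?_
    intro l hl
    rw [hb l, List.nil_append, (PySem.Set.contains_iff _ l).mpr hl, Bool.true_and, hPall l]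
  rw [hfilt _ hA2.2]
  -- B's sort produces exactly A's concatenated group chunks
  have hmem : ∀ a, a ∈ (pvCanon pvGroups (PySem.Set.ofList labels) []).flatMap (fun c => c.2)
      ↔ a ∈ List.filter (fun l => pvIndex.1.contains l) (PySem.Set.ofList labels) := by
    intro a
    rw [pvCanon_flat_mem pvGroups (PySem.Set.ofList labels) [] a, List.mem_filter]
    constructor
    · rintro ⟨hS, hf⟩
      refine ⟨(PySem.Set.contains_iff _ a).mp hS, ?_⟩
      rw [PySem.Dict.contains_iff_mem_keys, pvKeys]
      exact hf
    · rintro ⟨hS, hr⟩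
      refine ⟨(PySem.Set.contains_iff _ a).mpr hS, ?_⟩
      rw [PySem.Dict.contains_iff_mem_keys, pvKeys] at hr
      exact hr
  have hKnodup : ((pvCanon pvGroups (PySem.Set.ofList labels) []).flatMap (fun c => c.2)).Nodup :=
    (pvCanon_flat_sublist pvGroups (PySem.Set.ofList labels) []).nodup pvFlatNodup
  have hFnodup : (List.filter (fun l => pvIndex.1.contains l) (PySem.Set.ofList labels)).Nodup :=
    (PySem.Set.nodup_ofList labels).filter _
  have hperm : ((pvCanon pvGroups (PySem.Set.ofList labels) []).flatMap (fun c => c.2)).Perm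
      (List.filter (fun l => pvIndex.1.contains l) (PySem.Set.ofList labels)) :=
    (List.perm_ext_iff_of_nodup hKnodup hFnodup).mpr hmem
  have hpw : ((pvCanon pvGroups (PySem.Set.ofList labels) []).flatMap (fun c => c.2)).Pairwise
      (fun a b => pvIndex.1.getD a 0 < pvIndex.1.getD b 0) :=
    List.Pairwise.sublist (pvCanon_flat_sublist pvGroups (PySem.Set.ofList labels) [])
      (List.pairwise_map.mp pvRanks)
  have hknown : PySem.List.sorted
      (List.filter (fun l => pvIndex.1.contains l) (PySem.Set.ofList labels))
      (fun l => pvIndex.1.getD l 0) false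
      = (pvCanon pvGroups (PySem.Set.ofList labels) []).flatMap (fun c => c.2) :=
    PySem.List.sorted_eq_of_perm_of_pairwise_lt _ _ _ hperm hpw
  rw [hknown]
  -- grouping consecutive runs recovers the chunks
  have hnames : ((pvCanon pvGroups (PySem.Set.ofList labels) []).map Prod.fst).Pairwise (· ≠ ·) :=
    (pvCanon_names_sublist pvGroups (PySem.Set.ofList labels) []).nodup pvNamesNodup
  rw [pvOuter (pvCanon pvGroups (PySem.Set.ofList labels) []) []
    (pvCanon_nonempty pvGroups (PySem.Set.ofList labels) [])
    (pvCanon_gof pvGroups (PySem.Set.ofList labels) [] pvGOKtrue)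
    hnames (by intro a ha; simp at ha)]
  rw [List.append_nil, List.reverse_reverse]
  rw [PySem.List.foldl_append_eq_flatMap, List.nil_append]
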